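-- pv_equiv track=rewrite | github.com/jiange91/Leet4FLAG | CSpirationProblemList/String/12_l294_FlipGameII_Zijian.py | psts
-- ===== SOURCE A (Python) =====
-- def psts(cs):
--     s = []
--     for i in range(len(cs) - 1):
--         if cs[i] == '+' and cs[i+1] == '+':
--             s.append(i)
--     ans = []
--     for i in s:
--         pst = cs[0:i] + '--' + cs[i+2:len(cs)]
--         ans.append(pst)
--     return ans
-- ===== SOURCE B (Python) =====
-- def psts(cs):
--     ans = []
--     n = len(cs)
--     i = 0
--     while i < n:
--         if cs[i] != '+':
--             i += 1
--             continue
--         j = i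
--         while j < n and cs[j] == '+':
--             j += 1
--         L = j - i
--         if L >= 2:
--             pre, suf = cs[:i], cs[j:]
--             for k in range(L - 1):
--                 ans.append(pre + '+' * k + '--' + '+' * (L - 2 - k) + suf)
--         i = j
--     return ans
-- ===== Notes on version B (the rewrite author's own statement) =====
-- stated objective: alternative
-- what changed: Replaces A's per-index adjacent-pair scan plus per-match full-string reslicing with a run-length decomposition: B walks maximal runs of plus characters and, for each run of length L, emits the L-1 flipped strings by assembling each from the run's prefix, the flipped pair and the suffix, never re-testing pairs or re-slicing the whole string per match.
import Mathlib
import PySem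

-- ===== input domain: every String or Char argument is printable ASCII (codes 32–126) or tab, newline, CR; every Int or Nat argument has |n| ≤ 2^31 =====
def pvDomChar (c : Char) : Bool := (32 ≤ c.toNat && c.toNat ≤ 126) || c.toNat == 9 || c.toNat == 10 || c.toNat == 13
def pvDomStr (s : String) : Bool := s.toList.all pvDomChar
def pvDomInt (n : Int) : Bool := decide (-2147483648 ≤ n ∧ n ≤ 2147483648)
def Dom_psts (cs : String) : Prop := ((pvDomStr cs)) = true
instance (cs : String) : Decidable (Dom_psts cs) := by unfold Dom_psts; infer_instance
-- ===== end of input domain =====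

-- B replaces A's per-index adjacent-pair scan with a run-length decomposition over
-- maximal runs of '+' , assembling each flipped string from the run's parts (alternative; same return value).

-- ===== PORT A =====
-- A: collect all indices i with cs[i] == cs[i+1] == '+', then build cs[0:i] + '--' + cs[i+2:len(cs)] for each.
def psts (cs : String) : List String :=
  let l := cs.toList
  let s := (PySem.List.pyRange 0 ((l.length : Int) - 1) 1).foldl
      (fun s i =>
        if (PySem.List.pyGetD l i ' ' = '+' && PySem.List.pyGetD l (i + 1) ' ' = '+') = true
        then s ++ [i] else s) []
  s.foldl (fun ans i =>
      ans ++ [String.ofList (PySem.List.slice l (some 0) (some i) ++ ['-','-']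
                ++ PySem.List.slice l (some (i + 2)) (some (l.length : Int)))]) []

-- ===== PORT B =====
-- B's inner 'while j < n and cs[j] == "+": j += 1' (run end finder); exact.
def runEnd (l : List Char) (j : Nat) : Nat :=
  if h : j < l.length then
    if l[j] = '+' then runEnd l (j + 1) else j
  else j
termination_by l.length - j

-- termination of the outer loop: the run end is strictly past a '+' start
lemma lt_runEnd (l : List Char) (j : Nat) (h : j < l.length) (hp : l[j] = '+') :
    j < runEnd l j := by
  rw [runEnd, dif_pos h, if_pos hp]
  have : ∀ m, j + 1 ≤ m → j + 1 ≤ runEnd l m := by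
    intro m hm
    induction m using runEnd.induct l with
    | case1 m hlt hpl ih => rw [runEnd, dif_pos hlt, if_pos hpl]; exact ih (by omega)
    | case2 m hlt hpl => rw [runEnd, dif_pos hlt, if_neg hpl]; omega
    | case3 m hlt => rw [runEnd, dif_neg hlt]; omega
  exact this (j + 1) le_rfl

-- the per-run emission (Python's 'if L >= 2: for k in range(L - 1): ans.append(...)');
-- cs[:i] = take i, cs[j:] = drop j, '+' * k = replicate (exact: indices are nonneg and in range).
def runFlips (l : List Char) (i j : Nat) : List String :=
  let L := j - i
  if 2 ≤ L then
    (List.range (L - 1)).map (fun k =>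
      String.ofList (l.take i ++ List.replicate k '+' ++ ['-', '-']
        ++ List.replicate (L - 2 - k) '+' ++ l.drop j))
  else []

-- B's outer while loop over i, with 'continue' on non-'+' and the per-run emission appended.
def pstsOuter (l : List Char) (i : Nat) (ans : List String) : List String :=
  if h : i < l.length then
    if hp : l[i] = '+' then
      pstsOuter l (runEnd l i) (ans ++ runFlips l i (runEnd l i))
    else pstsOuter l (i + 1) ans
  else ans
termination_by l.length - i
decreasing_by
  · have := lt_runEnd l i h hp; omega
  · omega

def psts_alt (cs : String) : List String :=
  pstsOuter cs.toList 0 []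

-- ===== PRECONDITION & SPEC =====
def Spec_psts (cs : String) (out : List String) : Prop := out = psts_alt cs
instance (cs : String) (out : List String) : Decidable (Spec_psts cs out) := by unfold Spec_psts; infer_instance

-- ===== CLAIM (what is proved, stated in full; the proofs are below) =====
def Claim_equal_psts : Prop := ∀ (cs : String), Dom_psts cs → Spec_psts cs (psts cs)

-- ===== LEMMAS AND PROOFS =====

-- the '++'-at-position-i test, as a predicate on the flip position
def ppAt (l : List Char) (i : Int) : Bool := decide (['+','+'] <+: l.drop i.toNat)

-- the common canonical value: all flip positions ≥ pos, each mapped to the flipped string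
def flips (l : List Char) (pos : Int) : List String :=
  ((PySem.List.pyRange pos (l.length : Int) 1).filter (ppAt l)).map
    (fun i => String.ofList (l.take i.toNat ++ ['-','-'] ++ l.drop (i.toNat + 2)))

lemma prefix_pp_iff (m : List Char) :
    (['+','+'] <+: m) ↔ m[0]? = some '+' ∧ m[1]? = some '+' := by
  rw [List.prefix_iff_eq_take]
  match m with
  | [] => simp
  | [a] => simp
  | a :: b :: t => simp [List.take]; aesop

lemma ppAt_iff (l : List Char) (m : Nat) :
    ppAt l (m : Int) = true ↔ l[m]? = some '+' ∧ l[m + 1]? = some '+' := by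
  simp only [ppAt, Int.toNat_natCast, decide_eq_true_eq, prefix_pp_iff, List.getElem?_drop,
    Nat.add_zero]

lemma ppAt_false_of_ge (l : List Char) (i : Int) (h : (l.length : Int) - 1 ≤ i) :
    ppAt l i = false := by
  simp only [ppAt, decide_eq_false_iff_not]
  intro hp
  have := hp.length_le
  simp [List.length_drop] at this
  omega

lemma ppAt_eq_cond (l : List Char) (i : Int) (h0 : 0 ≤ i) (h1 : i < (l.length : Int) - 1) :
    (PySem.List.pyGetD l i ' ' = '+' && PySem.List.pyGetD l (i + 1) ' ' = '+') = ppAt l i := by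
  have h2 : (i + 1).toNat = i.toNat + 1 := by omega
  rw [PySem.List.pyGetD_eq_getElem l ' ' h0 (by omega),
      PySem.List.pyGetD_eq_getElem l ' ' (by omega) (by omega)]
  simp only [ppAt, prefix_pp_iff, List.getElem?_drop, h2, Nat.add_zero]
  have hn : i.toNat < l.length := by omega
  have hn1 : i.toNat + 1 < l.length := by omega
  simp [hn, hn1]

lemma psts_eq_flips (cs : String) : psts cs = flips cs.toList 0 := by
  have hflt : (PySem.List.pyRange 0 ((cs.toList.length : Int) - 1)).filter
      (fun i => PySem.List.pyGetD cs.toList i ' ' = '+' && PySem.List.pyGetD cs.toList (i + 1) ' ' = '+')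
      = (PySem.List.pyRange 0 (cs.toList.length : Int)).filter (ppAt cs.toList) := by
    rw [List.filter_congr (fun i hi => ppAt_eq_cond cs.toList i
        (PySem.List.mem_pyRange_one.mp hi).1 (PySem.List.mem_pyRange_one.mp hi).2)]
    rcases Nat.eq_zero_or_pos cs.toList.length with h | h
    · rw [PySem.List.pyRange_one_eq_nil (by omega), PySem.List.pyRange_one_eq_nil (by omega)]
    · have hz : (PySem.List.pyRange ((cs.toList.length : Int) - 1) (cs.toList.length : Int)).filter
          (ppAt cs.toList) = [] := by
        apply List.filter_eq_nil_iff.mpr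
        intro i hi hp
        have h1 := (PySem.List.mem_pyRange_one.mp hi).1
        simp [ppAt_false_of_ge cs.toList i h1] at hp
      rw [PySem.List.pyRange_one_append 0 ((cs.toList.length : Int) - 1) (cs.toList.length : Int)
        (by omega) (by omega), List.filter_append, hz, List.append_nil]
  simp only [psts, flips, PySem.List.foldl_append_if, PySem.List.foldl_append_singleton_eq_map,
    List.map_id', List.nil_append, hflt]
  apply List.map_congr_left
  intro i hi
  have h0 : 0 ≤ i := (PySem.List.mem_pyRange_one.mp (List.mem_of_mem_filter hi)).1
  have h2 : (i + 2).toNat = i.toNat + 2 := by omega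
  rw [PySem.List.slice_zero_start, PySem.List.slice_to cs.toList h0,
    PySem.List.slice_toNat cs.toList (by omega) (by omega), h2, Int.toNat_natCast,
    List.take_of_length_le (l := List.drop (i.toNat + 2) cs.toList) (by simp)]

-- run-end specification
lemma runEnd_le (l : List Char) (j : Nat) (hj : j ≤ l.length) : runEnd l j ≤ l.length := by
  induction j using runEnd.induct l with
  | case1 m hlt hpl ih => rw [runEnd, dif_pos hlt, if_pos hpl]; exact ih (by omega)
  | case2 m hlt hpl => rw [runEnd, dif_pos hlt, if_neg hpl]; omega
  | case3 m hlt => rw [runEnd, dif_neg hlt]; omega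

lemma runEnd_plus (l : List Char) (j : Nat) :
    ∀ m, j ≤ m → m < runEnd l j → l[m]? = some '+' := by
  induction j using runEnd.induct l with
  | case1 i hlt hpl ih =>
    intro m hm hmr
    rw [runEnd, dif_pos hlt, if_pos hpl] at hmr
    rcases Nat.eq_or_lt_of_le hm with rfl | h
    · simp [List.getElem?_eq_getElem hlt, hpl]
    · exact ih m h hmr
  | case2 i hlt hpl =>
    intro m hm hmr
    rw [runEnd, dif_pos hlt, if_neg hpl] at hmr; omega
  | case3 i hlt =>
    intro m hm hmr
    rw [runEnd, dif_neg hlt] at hmr; omega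

lemma runEnd_stop (l : List Char) (j : Nat) : l[runEnd l j]? ≠ some '+' := by
  induction j using runEnd.induct l with
  | case1 i hlt hpl ih => rw [runEnd, dif_pos hlt, if_pos hpl]; exact ih
  | case2 i hlt hpl =>
    rw [runEnd, dif_pos hlt, if_neg hpl]
    simp [List.getElem?_eq_getElem hlt]; exact hpl
  | case3 i hlt =>
    rw [runEnd, dif_neg hlt]
    simp [List.getElem?_eq_none (le_of_not_gt hlt)]

-- a block of '+'s inside [a, j) read off as a replicate (take side)
lemma take_run (l : List Char) (pos k : Nat)
    (hrun : ∀ m, pos ≤ m → m < pos + k → l[m]? = some '+') :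
    l.take (pos + k) = l.take pos ++ List.replicate k '+' := by
  induction k with
  | zero => simp
  | succ k ih =>
    have hk : l.take (pos + k + 1) = l.take (pos + k) ++ (l[pos + k]?).toList := List.take_add_one
    rw [show pos + (k + 1) = pos + k + 1 by omega, hk,
      ih (fun m h1 h2 => hrun m h1 (by omega)), hrun (pos + k) (by omega) (by omega)]
    simp [List.replicate_succ' (n := k), List.append_assoc]

-- a block of '+'s inside [a, j) read off as a replicate (drop side)
lemma drop_run (l : List Char) (j : Nat) :
    ∀ a, a ≤ j → (∀ m, a ≤ m → m < j → l[m]? = some '+') →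
      l.drop a = List.replicate (j - a) '+' ++ l.drop j := by
  intro a
  induction hd : j - a generalizing a with
  | zero =>
    intro haj _hrun
    have haj' : a = j := by omega
    subst haj'
    simp
  | succ d ih =>
    intro haj hrun
    have haj' : a < j := by omega
    have ha : l[a]? = some '+' := hrun a le_rfl haj'
    have hal : a < l.length := by
      by_contra h; simp [List.getElem?_eq_none (le_of_not_gt h)] at ha
    have : l.drop a = l[a] :: l.drop (a + 1) := (List.getElem_cons_drop hal).symm
    rw [this, ih (a + 1) (by omega) (by omega) (fun m h1 h2 => hrun m (by omega) h2)]
    have : l[a] = '+' := by simp [List.getElem?_eq_getElem hal] at ha; exact ha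
    simp [this, List.replicate_succ]

-- flips does a cons-step: skip a position without a match
lemma flips_step_skip (l : List Char) (pos : Nat) (hpos : pos < l.length)
    (hno : ppAt l (pos : Int) = false) :
    flips l (pos : Int) = flips l ((pos : Int) + 1) := by
  unfold flips
  rw [PySem.List.pyRange_one_cons (by omega), List.filter_cons_of_neg (by simp [hno])]

lemma flips_nil_of_ge (l : List Char) (pos : Nat) (h : l.length ≤ pos) :
    flips l (pos : Int) = [] := by
  unfold flips
  rw [PySem.List.pyRange_one_eq_nil (by omega)]
  simp

-- the heart: a maximal '+'-run [pos, j) contributes exactly B's per-run emission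
lemma flips_run (l : List Char) (pos j : Nat) (hpj : pos < j) (hjl : j ≤ l.length)
    (hrun : ∀ m, pos ≤ m → m < j → l[m]? = some '+')
    (hstop : l[j]? ≠ some '+') :
    flips l (pos : Int) =
      (List.range (j - pos - 1)).map (fun k =>
        String.ofList (l.take pos ++ List.replicate k '+' ++ ['-', '-']
          ++ List.replicate (j - pos - 2 - k) '+' ++ l.drop j))
      ++ flips l (j : Int) := by
  unfold flips
  rw [PySem.List.pyRange_one_append (pos : Int) (j : Int) (l.length : Int) (by omega) (by omega),
    List.filter_append, List.map_append]
  congr 1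
  have hfilter : (PySem.List.pyRange (pos : Int) (j : Int) 1).filter (ppAt l)
      = PySem.List.pyRange (pos : Int) ((j : Int) - 1) 1 := by
    have hsplit : PySem.List.pyRange (pos : Int) (j : Int) 1
        = PySem.List.pyRange (pos : Int) ((j : Int) - 1) 1
          ++ PySem.List.pyRange ((j : Int) - 1) (j : Int) 1 :=
      PySem.List.pyRange_one_append _ _ _ (by omega) (by omega)
    have hall : (PySem.List.pyRange (pos : Int) ((j : Int) - 1) 1).filter (ppAt l)
        = PySem.List.pyRange (pos : Int) ((j : Int) - 1) 1 := by
      apply List.filter_eq_self.mpr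
      intro i hi
      obtain ⟨h1, h2⟩ := PySem.List.mem_pyRange_one.mp hi
      have hi' : i = ((i.toNat : Nat) : Int) := by omega
      rw [hi', ppAt_iff]
      exact ⟨hrun i.toNat (by omega) (by omega), hrun (i.toNat + 1) (by omega) (by omega)⟩
    have hlast : (PySem.List.pyRange ((j : Int) - 1) (j : Int) 1).filter (ppAt l) = [] := by
      apply List.filter_eq_nil_iff.mpr
      intro i hi hp
      obtain ⟨h1, h2⟩ := PySem.List.mem_pyRange_one.mp hi
      have hij : i = ((j - 1 : Nat) : Int) := by omega
      rw [hij, ppAt_iff] at hp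
      rw [show j - 1 + 1 = j by omega] at hp
      exact hstop hp.2
    rw [hsplit, List.filter_append, hall, hlast, List.append_nil]
  rw [hfilter, PySem.List.pyRange_one]
  rw [show (((j : Int) - 1) - (pos : Int)).toNat = j - pos - 1 by omega, List.map_map]
  apply List.map_congr_left
  intro k hk
  have hk' : k < j - pos - 1 := List.mem_range.mp hk
  simp only [Function.comp_apply]
  rw [show ((pos : Int) + (k : Int)).toNat = pos + k by omega]
  rw [take_run l pos k (fun m h1 h2 => hrun m h1 (by omega)),
    show pos + k + 2 = pos + (k + 2) by omega,
    drop_run l j (pos + (k + 2)) (by omega) (fun m h1 h2 => hrun m (by omega) h2),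
    show j - (pos + (k + 2)) = j - pos - 2 - k by omega]
  simp [List.append_assoc]

-- runFlips's guard folded into the range length
lemma runFlips_eq_range (l : List Char) (i j : Nat) (hij : i < j) :
    runFlips l i j = (List.range (j - i - 1)).map (fun k =>
      String.ofList (l.take i ++ List.replicate k '+' ++ ['-', '-']
        ++ List.replicate (j - i - 2 - k) '+' ++ l.drop j)) := by
  unfold runFlips
  by_cases hL : 2 ≤ j - i
  · rw [if_pos hL]
  · rw [if_neg hL, show j - i - 1 = 0 by omega, List.range_zero, List.map_nil]

-- B's outer loop computes the canonical value
lemma pstsOuter_eq_flips (l : List Char) (pos : Nat) (ans : List String) :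
    pstsOuter l pos ans = ans ++ flips l (pos : Int) := by
  induction pos, ans using pstsOuter.induct l with
  | case1 i ans hlt hpl ih =>
    rw [pstsOuter, dif_pos hlt, dif_pos hpl, ih]
    have hj : i < runEnd l i := lt_runEnd l i hlt hpl
    have hjl : runEnd l i ≤ l.length := runEnd_le l i (by omega)
    rw [flips_run l i (runEnd l i) hj hjl (runEnd_plus l i) (runEnd_stop l i),
      runFlips_eq_range l i (runEnd l i) hj, List.append_assoc]
  | case2 i ans hlt hpl ih =>
    rw [pstsOuter, dif_pos hlt, dif_neg hpl]
    rw [ih, flips_step_skip l i hlt, show ((i : Int) + 1) = (((i + 1 : Nat)) : Int) by omega]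
    rw [Bool.eq_false_iff]
    intro h
    rw [ppAt_iff] at h
    exact hpl (by simpa [List.getElem?_eq_getElem hlt] using h.1)
  | case3 i ans hlt =>
    rw [pstsOuter, dif_neg hlt, flips_nil_of_ge l i (le_of_not_gt hlt), List.append_nil]

-- ===== VERDICT (by name: the statement is the Claim_ definition above) =====
theorem psts_spec : Claim_equal_psts := by
  intro cs _
  unfold Spec_psts psts_alt
  rw [psts_eq_flips, pstsOuter_eq_flips cs.toList 0 []]
  simp
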